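-- pv_equiv track=rewrite | github.com/jburn/school_projects | cryptographic_systems/vigenere_crack.py | vigenere_subkeys
-- ===== SOURCE A (Python) =====
-- ALPHABET = "ABCDEFGHIJKLMNOPQRSTUVWXYZ"
--
-- def decrypt_caesar(key, message):
--     message = message.upper()
--     result = ""
--     for letter in message:
--         if letter in ALPHABET:
--             letter_index = (ALPHABET.find(letter) - key) % len(ALPHABET)
--             result = result + ALPHABET[letter_index]
--         else:
--             result = result + letter
--
--     return result
--
-- def eng_freq_score(string):
--     eng_freq = "ETAOINSHRDLCUMWFGYPBVKJXQZ"
--     eng_freq_list = [c for c in eng_freq]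
--     counts = {}
--     for char in ALPHABET:
--         counts[char] = 0
--
--     for char in string:
--         counts[char] += 1
--
--     word_count_order = sorted(counts.items(), key=lambda x:x[1], reverse=True)
--     match_score = 0
--     value_dic = {}
--     for c in word_count_order:
--         if c[1] not in value_dic:
--             value_dic[c[1]] = [c[0]]
--         else:
--             value_dic[c[1]].append(c[0])
--     values = list(value_dic.values())
--     i = 0
--     j = 0
--     while eng_freq_list:
--         try:
--             curr_val = values[i][j] # if j is out of range we will go to except block
--             curr_l = values[i]
--             j += 1
--         except:
--             j = 0
--             i += 1
--             continue
--         curr_freq = eng_freq_list.pop(0)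
--         for n in curr_l:
--             if curr_freq == n:
--                 match_score += 1
--     return match_score
--
-- def vigenere_subkeys(num, string):
--     substrings = []
--     str_len = len(string)
--     for n in range(num):
--         substrings.append("")
--         for i in range(n, str_len, num):
--             substrings[n] += string[i]
--
--     subkeys = []
--     for s in substrings:
--         substring_eng_scores = {}
--         for a in ALPHABET:
--             decrypted = decrypt_caesar(ord(a)-65, s)
--             score = eng_freq_score(decrypted)
--             substring_eng_scores[a] = score
--         subkeys.append([x[0] for x in sorted(substring_eng_scores.items(), reverse=True, key=lambda x:x[1]) if x[1] > 4])
--     return subkeys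
-- ===== SOURCE B (Python) =====
-- # B: count each column's letters once, then score all 26 Caesar keys by rotating the
-- # 26-entry count vector, instead of re-decrypting and re-scanning the column per key.
-- ALPHABET = "ABCDEFGHIJKLMNOPQRSTUVWXYZ"
-- ENG_FREQ = "ETAOINSHRDLCUMWFGYPBVKJXQZ"
--
--
-- def _rank_score(pairs):
--     # score a (letter, count) table against English frequency order
--     word_count_order = sorted(pairs, key=lambda x: x[1], reverse=True)
--     match_score = 0
--     value_dic = {}
--     for c in word_count_order:
--         if c[1] not in value_dic:
--             value_dic[c[1]] = [c[0]]
--         else: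
--             value_dic[c[1]].append(c[0])
--     values = list(value_dic.values())
--     eng_freq_list = [c for c in ENG_FREQ]
--     i = 0
--     j = 0
--     while eng_freq_list:
--         try:
--             curr_val = values[i][j]
--             curr_l = values[i]
--             j += 1
--         except Exception:
--             j = 0
--             i += 1
--             continue
--         curr_freq = eng_freq_list.pop(0)
--         for n in curr_l:
--             if curr_freq == n:
--                 match_score += 1
--     return match_score
--
--
-- def vigenere_subkeys(num, string):
--     subkeys = []
--     str_len = len(string)
--     for n in range(num):
--         # one counting pass over the n-th column (no substring/decryption strings built)
--         base = [0] * 26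
--         for i in range(n, str_len, num):
--             u = string[i].upper()
--             if 'A' <= u <= 'Z':
--                 base[ord(u) - 65] += 1
--         # counts of the column decrypted with key k are a rotation of `base`
--         scores = [_rank_score(list(zip(ALPHABET,
--                                        [base[(c + key) % 26] for c in range(26)])))
--                   for key in range(26)]
--         subkeys.append([x[0] for x in sorted(zip(ALPHABET, scores),
--                                              reverse=True, key=lambda x: x[1]) if x[1] > 4])
--     return subkeys
-- ===== Notes on version B (the rewrite author's own statement) =====
-- stated objective: alternative
-- what changed: Instead of decrypting and re-scanning each column 26 times (once per Caesar key), B counts the column's letters once into a 26-entry vector and derives every key's letter counts by rotating that vector; the letter-frequency ranking of the resulting (letter,count) table is logic both versions share.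
import Mathlib
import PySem

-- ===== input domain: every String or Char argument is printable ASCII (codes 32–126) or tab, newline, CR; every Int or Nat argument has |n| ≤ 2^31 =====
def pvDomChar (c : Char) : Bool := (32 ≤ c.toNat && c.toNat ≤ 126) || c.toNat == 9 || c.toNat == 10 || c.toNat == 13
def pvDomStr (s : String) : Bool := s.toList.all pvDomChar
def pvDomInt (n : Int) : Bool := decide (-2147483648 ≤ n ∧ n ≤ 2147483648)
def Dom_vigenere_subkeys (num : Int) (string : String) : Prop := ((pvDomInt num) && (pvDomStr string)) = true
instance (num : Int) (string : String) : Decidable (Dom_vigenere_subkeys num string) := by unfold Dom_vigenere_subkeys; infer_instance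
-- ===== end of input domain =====

-- B counts each column's letters ONCE and scores all 26 Caesar keys by rotating that 26-entry
-- count vector, instead of A's re-decrypting and re-counting the whole column per key; the
-- scoring of a (letter, count) table against English frequency order is logic both share.

-- ALPHABET = "ABCDEFGHIJKLMNOPQRSTUVWXYZ"
def pvAL : List Char :=
  ['A','B','C','D','E','F','G','H','I','J','K','L','M','N','O','P','Q','R','S','T','U','V','W','X','Y','Z']
-- eng_freq = "ETAOINSHRDLCUMWFGYPBVKJXQZ"
def pvENG : List Char :=
  ['E','T','A','O','I','N','S','H','R','D','L','C','U','M','W','F','G','Y','P','B','V','K','J','X','Q','Z']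

-- ===== shared helper (the identical tail of A's eng_freq_score and of B's _rank_score) =====
-- the 'while eng_freq_list:' loop with its try/except; the fuel only makes it total — on the
-- 26-letter tables both programs build it runs at most 52 iterations, so fuel 100 is exact
def pvWhile : Nat → List Char → List (List Char) → Nat → Nat → Int → Int
  | 0, _, _, _, _, score => score
  | (fuel+1), effList, values, i, j, score =>
    match effList with
    | [] => score
    | f :: rest =>
      match values[i]? with
      | none => pvWhile fuel effList values (i+1) 0 score            -- except: j=0; i+=1; continue
      | some row =>
        match row[j]? with
        | none => pvWhile fuel effList values (i+1) 0 score          -- except: j=0; i+=1; continue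
        | some _ =>                                                   -- curr_l = values[i]; j += 1
          pvWhile fuel rest values i (j+1)                            -- curr_freq = eng_freq_list.pop(0)
            (score + row.foldl (fun m n => if f = n then m + 1 else m) 0)

-- sorted / value_dic grouping / while loop, from a list of (letter, count) pairs
def pvRankScore (pairs : List (Char × Int)) : Int :=
  let word_count_order := PySem.List.sorted pairs (fun x => x.2) true
  let value_dic : PySem.Dict Int (List Char) :=
    word_count_order.foldl (fun d c =>
      if d.contains c.2 then d.modify c.2 [] (fun l => l ++ [c.1])
      else d.insert c.2 [c.1]) PySem.Dict.empty
  pvWhile 100 pvENG value_dic.values 0 0 0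

-- ===== PORT A =====
-- decrypt_caesar; ALPHABET[letter_index] is always in range, the .getD 'A' only makes it total
def pvDecryptCaesar (key : Int) (message : List Char) : List Char :=
  (PySem.Chars.upper message).foldl (fun result letter =>
    if PySem.Chars.isIn [letter] pvAL then
      result ++ [(PySem.List.pyGet? pvAL
        (PySem.Int.mod (PySem.Chars.find pvAL [letter] - key) 26)).getD 'A']
    else result ++ [letter]) []

-- eng_freq_score; counts[char] += 1 is Dict.modify (exact where the key is present — Pre_
-- keeps the inputs where Python would raise KeyError outside the claim)
def pvEngFreqScore (s : List Char) : Int :=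
  let counts0 : PySem.Dict Char Int := pvAL.foldl (fun d ch => d.insert ch 0) PySem.Dict.empty
  let counts := s.foldl (fun d ch => d.modify ch 0 (· + 1)) counts0
  pvRankScore counts.items

-- body of A's per-substring loop: score all 26 keys by decrypt + rescan, sort, filter > 4
def pvAcol (s : List Char) : List String :=
  let scoresD : PySem.Dict Char Int :=
    pvAL.foldl (fun d a =>
      d.insert a (pvEngFreqScore (pvDecryptCaesar ((a.toNat : Int) - 65) s))) PySem.Dict.empty
  ((PySem.List.sorted scoresD.items (fun x => x.2) true).filter
    (fun x => 4 < x.2)).map (fun x => String.singleton x.1)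

def vigenere_subkeys (num : Int) (string : String) : List (List String) :=
  let str_len : Int := PySem.Str.len string
  let substrings : List (List Char) :=
    (PySem.List.pyRange 0 num 1).foldl (fun substrings n =>
      substrings ++ [(PySem.List.pyRange n str_len num).foldl
        (fun sub i => sub ++ [PySem.List.pyGetD string.toList i 'A']) []]) []
  substrings.foldl (fun subkeys s => subkeys ++ [pvAcol s]) []

-- ===== PORT B =====
-- one counting step of B's per-column pass ("if 'A' <= u <= 'Z': base[ord(u)-65] += 1")
def pvColStep (base : List Int) (ch : Char) : List Int :=
  let u := PySem.Chars.upperChar ch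
  if 'A' ≤ u ∧ u ≤ 'Z' then
    PySem.List.pySetD base ((u.toNat : Int) - 65)
      (PySem.List.pyGetD base ((u.toNat : Int) - 65) 0 + 1)
  else base

-- body of B's per-column loop: rotate the count vector per key, score, sort, filter > 4
def pvBcol (base : List Int) : List String :=
  let scores : List Int :=
    (PySem.List.pyRange 0 26 1).map (fun key =>
      pvRankScore (pvAL.zip ((PySem.List.pyRange 0 26 1).map (fun c =>
        PySem.List.pyGetD base (PySem.Int.mod (c + key) 26) 0))))
  ((PySem.List.sorted (pvAL.zip scores) (fun x => x.2) true).filter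
    (fun x => 4 < x.2)).map (fun x => String.singleton x.1)

def vigenere_subkeys_alt (num : Int) (string : String) : List (List String) :=
  let str_len : Int := PySem.Str.len string
  (PySem.List.pyRange 0 num 1).map (fun n =>
    pvBcol ((PySem.List.pyRange n str_len num).foldl
      (fun base i => pvColStep base (PySem.List.pyGetD string.toList i 'A'))
      (List.replicate 26 0)))

-- ===== PRECONDITION & SPEC =====
-- Pre_ excludes exactly the inputs where A raises: with num > 0, any character of the string
-- that is not an ASCII letter reaches eng_freq_score's counts[char] += 1 and raises KeyError.
def Pre_vigenere_subkeys (num : Int) (string : String) : Prop :=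
  num ≤ 0 ∨ (string.toList.all
    (fun c => (65 ≤ c.toNat && c.toNat ≤ 90) || (97 ≤ c.toNat && c.toNat ≤ 122)) = true)
instance (num : Int) (string : String) : Decidable (Pre_vigenere_subkeys num string) := by
  unfold Pre_vigenere_subkeys; infer_instance

def pvWitness_vigenere_subkeys : Int × String := (2, "ATTACKATDAWN")

def Spec_vigenere_subkeys (num : Int) (string : String) (out : List (List String)) : Prop :=
  out = vigenere_subkeys_alt num string
instance (num : Int) (string : String) (out : List (List String)) : Decidable (Spec_vigenere_subkeys num string out) := by unfold Spec_vigenere_subkeys; infer_instance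

-- ===== CLAIM (what is proved, stated in full; the proofs are below) =====
def Claim_equal_vigenere_subkeys : Prop := ∀ (num : Int) (string : String), Dom_vigenere_subkeys num string → Pre_vigenere_subkeys num string → Spec_vigenere_subkeys num string (vigenere_subkeys num string)

-- ===== LEMMAS AND PROOFS =====

def pvLetter (c : Char) : Prop :=
  (65 ≤ c.toNat ∧ c.toNat ≤ 90) ∨ (97 ≤ c.toNat ∧ c.toNat ≤ 122)

-- the character decrypt_caesar writes for an alphabet letter
def pvShift (key : Int) (c : Char) : Char :=
  (PySem.List.pyGet? pvAL (PySem.Int.mod (PySem.Chars.find pvAL [c] - key) 26)).getD 'A'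

set_option maxRecDepth 4000 in
theorem pv_al_bounds (u : Char) (h : u ∈ pvAL) :
    ('A' ≤ u ∧ u ≤ 'Z') ∧ 65 ≤ u.toNat ∧ u.toNat ≤ 90 ∧ pvAL.getD (u.toNat - 65) 'A' = u := by
  fin_cases h <;> decide

set_option maxRecDepth 4000 in
theorem pv_al_getD_toNat (j : Nat) (hj : j < 26) : (pvAL.getD j 'A').toNat = 65 + j := by
  interval_cases j <;> decide

set_option maxRecDepth 4000 in
theorem pv_getD_mem (i : Nat) (hi : i < 26) : pvAL.getD i 'A' ∈ pvAL := by
  interval_cases i <;> decide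

set_option maxRecDepth 4000 in
theorem pv_isIn (c : Char) (h : c ∈ pvAL) : PySem.Chars.isIn [c] pvAL = true := by
  fin_cases h <;> decide

set_option maxRecDepth 4000 in
theorem pv_find (c : Char) (h : c ∈ pvAL) :
    PySem.Chars.find pvAL [c] = (c.toNat : Int) - 65 := by
  fin_cases h <;> decide

set_option maxRecDepth 4000 in
theorem pv_upper_mem (c : Char) (h : pvLetter c) : PySem.Chars.upperChar c ∈ pvAL := by
  have hc : Char.ofNat c.toNat = c := Char.ofNat_toNat c
  rcases h with ⟨h1, h2⟩ | ⟨h1, h2⟩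
  · have b1 : 65 ≤ c.toNat := h1
    have b2 : c.toNat ≤ 90 := h2
    rw [← hc]
    interval_cases h : c.toNat <;> decide
  · have b1 : 97 ≤ c.toNat := h1
    have b2 : c.toNat ≤ 122 := h2
    rw [← hc]
    interval_cases h : c.toNat <;> decide

theorem pv_dec_eq_map (key : Int) (t : List Char) (ht : ∀ c ∈ t, pvLetter c) :
    pvDecryptCaesar key t = (t.map PySem.Chars.upperChar).map (pvShift key) := by
  unfold pvDecryptCaesar
  have hup : PySem.Chars.upper t = t.map PySem.Chars.upperChar := rfl
  rw [hup]
  rw [PySem.List.foldl_congr_mem (t.map PySem.Chars.upperChar) _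
    (fun result letter => result ++ [pvShift key letter]) []
    (by
      intro acc x hx
      rcases List.mem_map.mp hx with ⟨c, hc, rfl⟩
      rw [if_pos (pv_isIn _ (pv_upper_mem c (ht c hc)))]
      rfl)]
  exact PySem.List.foldl_append_singleton_eq_map _ _ []

set_option maxRecDepth 4000 in
theorem pv_counter_items (t : List Char) (ht : ∀ c ∈ t, c ∈ pvAL) :
    (t.foldl (fun d ch => d.modify ch 0 (· + 1))
      (pvAL.foldl (fun d ch => d.insert ch (0 : Int)) PySem.Dict.empty)).items
    = pvAL.map (fun c => (c, (t.count c : Int))) := by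
  set d0 : PySem.Dict Char Int := pvAL.foldl (fun d ch => d.insert ch (0 : Int)) PySem.Dict.empty with hd0
  have hkeys0 : d0.keys = pvAL := by decide
  have hkeys : (t.foldl (fun d ch => d.modify ch 0 (· + 1)) d0).keys = pvAL := by
    have := PySem.Dict.keys_foldl_modify t (0 : Int) (fun _ _ => (· + 1)) d0
    rw [this, hkeys0, PySem.Set.update_eq_append_filter]
    have : List.filter (fun y => !PySem.Set.contains pvAL y) (PySem.Set.ofList t) = [] := by
      rw [List.filter_eq_nil_iff]
      intro a ha
      have hat : a ∈ t := (PySem.Set.mem_ofList t a).mp ha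
      simp
      exact ht a hat
    rw [this, List.append_nil]
  have hnd : (t.foldl (fun d ch => d.modify ch 0 (· + 1)) d0).keys.Nodup := by
    rw [hkeys]; decide
  rw [PySem.Dict.items_eq_map_keys _ hnd 0, hkeys]
  apply List.map_congr_left
  intro c hc
  have hg : (t.foldl (fun d ch => d.modify ch 0 (· + 1)) d0).getD c 0 = d0.getD c 0 + (t.count c : Int) :=
    PySem.Dict.getD_foldl_modify_add_one t d0 c
  have h0 : d0.getD c 0 = 0 := by fin_cases hc <;> decide
  rw [hg, h0, zero_add]

theorem pv_cvec (t : List Char) (ht : ∀ c ∈ t, pvLetter c) :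
    ∀ (v : List Int), v.length = 26 →
      (t.foldl pvColStep v).length = 26 ∧
      ∀ j : Nat, j < 26 →
        PySem.List.pyGetD (t.foldl pvColStep v) (j : Int) 0
          = PySem.List.pyGetD v (j : Int) 0 + ((t.map PySem.Chars.upperChar).count (pvAL.getD j 'A') : Int) := by
  induction t with
  | nil => intro v hv; exact ⟨hv, by simp⟩
  | cons c t ih =>
    intro v hv
    have hu := pv_upper_mem c (ht c List.mem_cons_self)
    obtain ⟨hcond, hb1, hb2, hgetD⟩ := pv_al_bounds _ hu
    set u := PySem.Chars.upperChar c with hudef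
    set m : Nat := u.toNat - 65 with hm
    have hmlt : m < 26 := by omega
    have hcast : ((u.toNat : Int) - 65) = (m : Int) := by omega
    have hstep : pvColStep v c = PySem.List.pySetD v (m : Int) (PySem.List.pyGetD v (m : Int) 0 + 1) := by
      unfold pvColStep
      rw [if_pos hcond, hcast]
    have hlen' : (PySem.List.pySetD v (m : Int) (PySem.List.pyGetD v (m : Int) 0 + 1)).length = 26 := by
      rw [PySem.List.length_pySetD]; exact hv
    have hfold : (c :: t).foldl pvColStep v = t.foldl pvColStep (pvColStep v c) := rfl
    rw [hfold, hstep]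
    obtain ⟨hL, hG⟩ := ih (fun x hx => ht x (List.mem_cons_of_mem _ hx)) _ hlen'
    refine ⟨hL, ?_⟩
    intro j hj
    rw [hG j hj]
    have hset : PySem.List.pyGetD (PySem.List.pySetD v (m : Int) (PySem.List.pyGetD v (m : Int) 0 + 1)) (j : Int) 0
        = if j = m then PySem.List.pyGetD v (m : Int) 0 + 1 else PySem.List.pyGetD v (j : Int) 0 :=
      PySem.List.pyGetD_pySetD_natCast v m j _ 0 (by omega)
    rw [hset]
    have hcnt : ((c :: t).map PySem.Chars.upperChar).count (pvAL.getD j 'A')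
        = (t.map PySem.Chars.upperChar).count (pvAL.getD j 'A')
          + (if u = pvAL.getD j 'A' then 1 else 0) := by
      by_cases h : u = pvAL.getD j 'A'
      · rw [List.map_cons, List.count_cons, if_pos h, ← hudef, ← h]
        simp
      · rw [List.map_cons, List.count_cons, if_neg h, ← hudef]
        simp
        exact fun hh => h (by simpa using hh)
    have hiff : (u = pvAL.getD j 'A') ↔ j = m := by
      constructor
      · intro h
        have h2 := congrArg Char.toNat h
        rw [pv_al_getD_toNat j hj] at h2
        omega
      · intro h
        exact (h ▸ hgetD).symm
    rw [hcnt]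
    by_cases hjm : j = m
    · rw [if_pos hjm, if_pos (hiff.mpr hjm), hjm]
      push_cast; ring
    · rw [if_neg hjm, if_neg (fun h => hjm (hiff.mp h))]
      push_cast; ring

theorem pv_shift_val (k : Nat) (hk : k < 26) (x : Char) (hx : x ∈ pvAL) :
    pvShift (k : Int) x = pvAL.getD ((x.toNat - 65 + 26 - k) % 26) 'A' := by
  obtain ⟨-, hb1, hb2, -⟩ := pv_al_bounds x hx
  unfold pvShift
  rw [pv_find x hx, PySem.Int.mod_eq_emod_of_pos (by norm_num)]
  have h0 : (0:Int) ≤ ((x.toNat : Int) - 65 - k) % 26 := Int.emod_nonneg _ (by norm_num)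
  have h1 : ((x.toNat : Int) - 65 - k) % 26 < 26 := Int.emod_lt_of_pos _ (by norm_num)
  have h2 : ((x.toNat : Int) - 65 - k) % 26 = (((x.toNat - 65 + 26 - k) % 26 : Nat) : Int) := by
    have hx26 : ((x.toNat - 65 + 26 - k) % 26 : Nat) < 26 := Nat.mod_lt _ (by norm_num)
    omega
  rw [h2, PySem.List.pyGet?_natCast]
  have hlt : (x.toNat - 65 + 26 - k) % 26 < pvAL.length := by
    have := Nat.mod_lt (x.toNat - 65 + 26 - k) (y := 26) (by norm_num); simpa [pvAL] using this
  simp [List.getElem?_eq_getElem hlt, List.getD_eq_getElem?_getD]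

theorem pv_getD_inj (a b : Nat) (ha : a < 26) (hb : b < 26)
    (h : pvAL.getD a 'A' = pvAL.getD b 'A') : a = b := by
  have h2 := congrArg Char.toNat h
  rw [pv_al_getD_toNat a ha, pv_al_getD_toNat b hb] at h2
  omega

theorem pv_shift_eq_iff (k j : Nat) (hk : k < 26) (hj : j < 26) (x : Char) (hx : x ∈ pvAL) :
    (pvShift (k : Int) x = pvAL.getD j 'A') ↔ (x = pvAL.getD ((j + k) % 26) 'A') := by
  obtain ⟨-, hb1, hb2, hg⟩ := pv_al_bounds x hx
  rw [pv_shift_val k hk x hx]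
  have hM : (x.toNat - 65 + 26 - k) % 26 < 26 := Nat.mod_lt _ (by norm_num)
  constructor
  · intro h
    have := pv_getD_inj _ _ hM hj h
    have hm0 : x.toNat - 65 = (j + k) % 26 := by omega
    rw [← hg, hm0]
  · intro h
    have h2 := congrArg Char.toNat h
    rw [pv_al_getD_toNat _ (Nat.mod_lt _ (by norm_num))] at h2
    have : (x.toNat - 65 + 26 - k) % 26 = j := by omega
    rw [this]

theorem pv_count_shift (k j : Nat) (hk : k < 26) (hj : j < 26)
    (u : List Char) (hu : ∀ c ∈ u, c ∈ pvAL) :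
    (u.map (pvShift (k : Int))).count (pvAL.getD j 'A') = u.count (pvAL.getD ((j + k) % 26) 'A') := by
  induction u with
  | nil => rfl
  | cons c u ih =>
    rw [List.map_cons, List.count_cons, List.count_cons,
      ih (fun x hx => hu x (List.mem_cons_of_mem _ hx))]
    congr 1
    have := pv_shift_eq_iff k j hk hj c (hu c List.mem_cons_self)
    by_cases h : pvShift (k : Int) c = pvAL.getD j 'A'
    · rw [if_pos (beq_iff_eq.mpr h), if_pos (beq_iff_eq.mpr (this.mp h))]
    · rw [if_neg (fun hh => h (beq_iff_eq.mp hh)),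
        if_neg (fun hh => h (this.mpr (beq_iff_eq.mp hh)))]

-- per-key score equality: A's decrypt-and-rescan score equals B's rotated-count score
theorem pv_key_score (t : List Char) (ht : ∀ c ∈ t, pvLetter c) (j : Nat) (hj : j < 26) :
    pvEngFreqScore (pvDecryptCaesar (j : Int) t)
      = pvRankScore (pvAL.zip ((PySem.List.pyRange 0 26 1).map (fun c =>
          PySem.List.pyGetD (t.foldl pvColStep (List.replicate 26 0))
            (PySem.Int.mod (c + (j : Int)) 26) 0))) := by
  have hu : ∀ c ∈ t.map PySem.Chars.upperChar, c ∈ pvAL := by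
    intro c hc
    rcases List.mem_map.mp hc with ⟨x, hx, rfl⟩
    exact pv_upper_mem x (ht x hx)
  rw [pv_dec_eq_map (j : Int) t ht]
  unfold pvEngFreqScore
  show pvRankScore (((t.map PySem.Chars.upperChar).map (pvShift (j : Int))).foldl
      (fun d ch => d.modify ch 0 (· + 1))
      (pvAL.foldl (fun d ch => d.insert ch (0 : Int)) PySem.Dict.empty)).items = _
  have hdecmem : ∀ c ∈ (t.map PySem.Chars.upperChar).map (pvShift (j : Int)), c ∈ pvAL := by
    intro c hc
    rcases List.mem_map.mp hc with ⟨x, hx, rfl⟩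
    rw [pv_shift_val j hj x (hu x hx)]
    exact pv_getD_mem _ (Nat.mod_lt _ (by norm_num))
  rw [pv_counter_items _ hdecmem]
  congr 1
  have hA : pvAL.map (fun c => (c, ((((t.map PySem.Chars.upperChar).map (pvShift (j : Int))).count c : Nat) : Int)))
      = (List.range 26).map (fun j' => (pvAL.getD j' 'A',
          ((((t.map PySem.Chars.upperChar).map (pvShift (j : Int))).count (pvAL.getD j' 'A') : Nat) : Int))) := rfl
  have hB : pvAL.zip ((PySem.List.pyRange 0 26 1).map (fun c =>
        PySem.List.pyGetD (t.foldl pvColStep (List.replicate 26 0)) (PySem.Int.mod (c + (j : Int)) 26) 0))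
      = (List.range 26).map (fun j' => (pvAL.getD j' 'A',
          PySem.List.pyGetD (t.foldl pvColStep (List.replicate 26 0)) (PySem.Int.mod ((j' : Int) + (j : Int)) 26) 0)) := rfl
  rw [hA, hB]
  apply List.map_congr_left
  intro j' hj'
  have hj'26 : j' < 26 := List.mem_range.mp hj'
  have hmod : PySem.Int.mod ((j' : Int) + (j : Int)) 26 = (((j' + j) % 26 : Nat) : Int) := by
    have := PySem.Int.mod_natCast (j' + j) 26
    push_cast at this ⊢
    omega
  rw [hmod]
  obtain ⟨-, hG⟩ := pv_cvec t ht (List.replicate 26 0) (by simp)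
  rw [hG ((j' + j) % 26) (Nat.mod_lt _ (by norm_num))]
  rw [pv_count_shift j j' hj hj'26 _ hu]
  have hrep : PySem.List.pyGetD (List.replicate 26 (0 : Int)) (((j' + j) % 26 : Nat) : Int) 0 = 0 := by
    rw [PySem.List.pyGetD_natCast, List.getD_eq_getElem?_getD, List.getElem?_replicate,
      if_pos (Nat.mod_lt _ (by norm_num : (0:Nat) < 26))]
    rfl
  rw [hrep, zero_add]

-- per-column equality of the two loop bodies
theorem pv_col (t : List Char) (ht : ∀ c ∈ t, pvLetter c) :
    pvAcol t = pvBcol (t.foldl pvColStep (List.replicate 26 0)) := by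
  simp only [pvAcol, pvBcol]
  have hitems : (pvAL.foldl (fun d a =>
      d.insert a (pvEngFreqScore (pvDecryptCaesar ((a.toNat : Int) - 65) t)))
      (PySem.Dict.empty : PySem.Dict Char Int)).items
      = pvAL.map (fun a => (a, pvEngFreqScore (pvDecryptCaesar ((a.toNat : Int) - 65) t))) := by
    have := PySem.Dict.items_foldl_insert_fresh pvAL (fun a => a)
      (fun a => pvEngFreqScore (pvDecryptCaesar ((a.toNat : Int) - 65) t))
      (PySem.Dict.empty : PySem.Dict Char Int)
      (by intro a _; rfl)
      (by show (pvAL.map (fun a => a)).Nodup; rw [List.map_id']; decide)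
    simpa using this
  suffices h : pvAL.map (fun a => (a, pvEngFreqScore (pvDecryptCaesar ((a.toNat : Int) - 65) t)))
      = pvAL.zip ((PySem.List.pyRange 0 26 1).map (fun key =>
          pvRankScore (pvAL.zip ((PySem.List.pyRange 0 26 1).map (fun c =>
            PySem.List.pyGetD (t.foldl pvColStep (List.replicate 26 0))
              (PySem.Int.mod (c + key) 26) 0))))) by
    rw [hitems, h]
  have hA : pvAL.map (fun a => (a, pvEngFreqScore (pvDecryptCaesar ((a.toNat : Int) - 65) t)))
      = (List.range 26).map (fun j => (pvAL.getD j 'A',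
          pvEngFreqScore (pvDecryptCaesar (((pvAL.getD j 'A').toNat : Int) - 65) t))) := rfl
  have hB : pvAL.zip ((PySem.List.pyRange 0 26 1).map (fun key =>
        pvRankScore (pvAL.zip ((PySem.List.pyRange 0 26 1).map (fun c =>
          PySem.List.pyGetD (t.foldl pvColStep (List.replicate 26 0))
            (PySem.Int.mod (c + key) 26) 0)))))
      = (List.range 26).map (fun j => (pvAL.getD j 'A',
          pvRankScore (pvAL.zip ((PySem.List.pyRange 0 26 1).map (fun c =>
            PySem.List.pyGetD (t.foldl pvColStep (List.replicate 26 0))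
              (PySem.Int.mod (c + (j : Int)) 26) 0))))) := rfl
  rw [hA, hB]
  apply List.map_congr_left
  intro j hj
  have hj26 : j < 26 := List.mem_range.mp hj
  have hkey : ((pvAL.getD j 'A').toNat : Int) - 65 = (j : Int) := by
    have := pv_al_getD_toNat j hj26; omega
  rw [hkey, pv_key_score t ht j hj26]

-- ===== VERDICT (by name: the statement is the Claim_ definition above) =====
theorem vigenere_subkeys_spec : Claim_equal_vigenere_subkeys := by
  intro num string _hdom hpre
  unfold Spec_vigenere_subkeys vigenere_subkeys vigenere_subkeys_alt
  rcases hpre with hnum | hall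
  · rw [PySem.List.pyRange_one_eq_nil hnum]
    rfl
  · simp only [PySem.List.foldl_append_singleton_eq_map, List.nil_append, List.map_map]
    apply List.map_congr_left
    intro n hn
    obtain ⟨hn0, hnlt⟩ := PySem.List.mem_pyRange_one.mp hn
    simp only [Function.comp_apply]
    set t := (PySem.List.pyRange n (PySem.Str.len string) num).map
        (fun i => PySem.List.pyGetD string.toList i 'A') with hts
    have ht : ∀ c ∈ t, pvLetter c := by
      intro c hc
      rcases List.mem_map.mp hc with ⟨i, hi, rfl⟩
      obtain ⟨hi1, hi2, -⟩ := (PySem.List.mem_pyRange_iff_of_pos (by omega) i).mp hi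
      have hlen : PySem.Str.len string = (string.toList.length : Int) := by
        simp [PySem.Str.len_eq]
      have hget : PySem.List.pyGetD string.toList i 'A' = string.toList[i.toNat] := by
        apply PySem.List.pyGetD_eq_getElem
        · omega
        · omega
      rw [hget]
      have hmem : string.toList[i.toNat]'(by omega) ∈ string.toList := List.getElem_mem _
      have hb2 := List.all_eq_true.mp hall _ hmem
      unfold pvLetter
      simpa using hb2
    have hbase : (PySem.List.pyRange n (PySem.Str.len string) num).foldl
        (fun base i => pvColStep base (PySem.List.pyGetD string.toList i 'A'))
        (List.replicate 26 0) = t.foldl pvColStep (List.replicate 26 0) := by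
      rw [hts, List.foldl_map]
    rw [hbase]
    exact pv_col t ht
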